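-- pv_equiv track=rewrite | github.com/maxippacheco/aed2024 | tpl_1/tpl_8.py | sign_split
-- ===== SOURCE A (Python) =====
-- def sign_split(L, VL):
--     pos = []
--     neg = []
--     prev = 0
--
--     while L:
--         # Es mas grande q 0?
--         if L[0] >= 0:
--             # pushea el primer elemento ahi
--             pos.append(L.pop(0))
--             # si el anterior era negativo
--             if prev == -1:
--                 # pushealo a los negativos
--                 VL.append(neg)
--                 # reestablece el array
--                 neg = []
--             # setea el actual a 1
--             prev = 1
--         else:
--             # es menor q 0, setea los menores a 0
--             neg.append(L.pop(0))
--             # si el anterior es mayor a 1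
--             if prev == 1:
--                 # hacele append a los positivos
--                 VL.append(pos)
--                 # resetea los positivos
--                 pos = []
--             # actualiza el actual
--             prev = -1
--         # guarda la suma de ambos
--         final = pos + neg
--     VL.append(final)
--     return VL
-- ===== SOURCE B (Python) =====
-- def sign_split(L, VL):
--     # One forward pass over L, emitting the current run on each sign change
--     # (no pop(0), no repeated pos+neg concatenation). Like A, it empties L
--     # and appends the runs to VL, returning VL. On empty L, A raises
--     # NameError while this returns VL with one empty group appended.
--     group = []
--     for x in L:
--         if group and (x >= 0) != (group[-1] >= 0):
--             VL.append(group)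
--             group = []
--         group.append(x)
--     L.clear()
--     VL.append(group)
--     return VL
-- ===== Notes on version B (the rewrite author's own statement) =====
-- stated objective: faster
-- what changed: Replaces the quadratic while/pop(0) loop with pos/neg/prev state and a per-iteration pos+neg concatenation by a single forward pass that keeps only the current run and emits it on sign change.
import Mathlib
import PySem

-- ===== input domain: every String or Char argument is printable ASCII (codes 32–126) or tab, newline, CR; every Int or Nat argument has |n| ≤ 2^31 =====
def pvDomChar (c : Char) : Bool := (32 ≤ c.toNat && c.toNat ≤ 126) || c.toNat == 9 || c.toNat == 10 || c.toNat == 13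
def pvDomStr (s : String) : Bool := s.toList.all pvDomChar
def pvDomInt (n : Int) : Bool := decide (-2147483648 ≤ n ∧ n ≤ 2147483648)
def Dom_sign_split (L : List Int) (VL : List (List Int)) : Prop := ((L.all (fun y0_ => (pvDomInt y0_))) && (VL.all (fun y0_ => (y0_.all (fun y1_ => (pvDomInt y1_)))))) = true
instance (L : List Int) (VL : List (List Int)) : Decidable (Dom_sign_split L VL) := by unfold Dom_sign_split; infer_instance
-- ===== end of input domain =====

-- B replaces A's quadratic while/pop(0) loop (pos/neg/prev state, per-step pos+neg
-- concatenation) by a single forward pass emitting the current run on sign change;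
-- both mutate L (emptied) and VL (runs appended) identically, return value is VL.


-- ===== PORT A =====
-- state: remaining L, pos, neg, prev, VL, final (Python's `final`, undefined before
-- the first iteration, modelled as [] — never read inside Pre_, where L ≠ []).
def signSplitLoopA : List Int → List Int → List Int → Int → List (List Int) → List Int →
    (List (List Int) × List Int)
  | [], _, _, _, vl, final => (vl, final)
  | x :: rest, pos, neg, prev, vl, final =>
    if x ≥ 0 then
      let pos' := pos ++ [x]
      let vl' := if prev = -1 then vl ++ [neg] else vl
      let neg' := if prev = -1 then [] else neg
      signSplitLoopA rest pos' neg' 1 vl' (pos' ++ neg')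
    else
      let neg' := neg ++ [x]
      let vl' := if prev = 1 then vl ++ [pos] else vl
      let pos' := if prev = 1 then [] else pos
      signSplitLoopA rest pos' neg' (-1) vl' (pos' ++ neg')

def sign_split (L : List Int) (VL : List (List Int)) : List (List Int) :=
  let r := signSplitLoopA L [] [] 0 VL []
  r.1 ++ [r.2]

-- ===== PORT B =====
-- state: remaining input, current run `group`, accumulated VL
def signSplitLoopB : List Int → List Int → List (List Int) → List (List Int)
  | [], group, vl => vl ++ [group]
  | x :: rest, group, vl =>
    if !group.isEmpty && (decide (x ≥ 0) != decide (group.getLastD 0 ≥ 0)) then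
      signSplitLoopB rest ([] ++ [x]) (vl ++ [group])
    else
      signSplitLoopB rest (group ++ [x]) vl

def sign_split_alt (L : List Int) (VL : List (List Int)) : List (List Int) :=
  signSplitLoopB L [] VL

-- ===== PRECONDITION & SPEC =====
-- Pre_ excludes only L = [], where Python A raises NameError (`final` unassigned).
def Pre_sign_split (L : List Int) (VL : List (List Int)) : Prop := L ≠ []
instance (L : List Int) (VL : List (List Int)) : Decidable (Pre_sign_split L VL) := by
  unfold Pre_sign_split; infer_instance
def pvWitness_sign_split : List Int × List (List Int) := ([1, -2, 3], [[0]])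

def Spec_sign_split (L : List Int) (VL : List (List Int)) (out : List (List Int)) : Prop :=
  out = sign_split_alt L VL
instance (L : List Int) (VL : List (List Int)) (out : List (List Int)) :
    Decidable (Spec_sign_split L VL out) := by unfold Spec_sign_split; infer_instance

-- ===== CLAIM (what is proved, stated in full; the proofs are below) =====
def Claim_equal_sign_split : Prop := ∀ (L : List Int) (VL : List (List Int)),
  Dom_sign_split L VL → Pre_sign_split L VL → Spec_sign_split L VL (sign_split L VL)

-- ===== LEMMAS AND PROOFS =====

-- Invariant: after the first element, exactly one of pos/neg is the current run g
-- (matching prev), the other is empty, and `final` equals g; then A's loop result,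
-- packed as vl ++ [final], is B's loop on (rest, g, vl).  The flag s records
-- whether the run is nonnegative (prev = 1) and equals the sign of g's last element.
theorem loopA_eq_loopB (rest : List Int) : ∀ (g : List Int) (vl : List (List Int)) (s : Bool),
    g ≠ [] → (decide (g.getLastD 0 ≥ 0) = s) →
    (let r := if s then signSplitLoopA rest g [] 1 vl g
              else signSplitLoopA rest [] g (-1) vl g
     r.1 ++ [r.2]) = signSplitLoopB rest g vl := by
  induction rest with
  | nil =>
    intro g vl s hg hs
    cases s <;> simp [signSplitLoopA, signSplitLoopB]
  | cons x rest ih =>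
    intro g vl s hg hs
    by_cases hx : x ≥ 0
    · cases s with
      | true =>
        -- same sign: run extended
        have h1 : (signSplitLoopA (x :: rest) g [] 1 vl g) =
            signSplitLoopA rest (g ++ [x]) [] 1 vl (g ++ [x]) := by
          simp [signSplitLoopA, hx]
        have h2 : signSplitLoopB (x :: rest) g vl = signSplitLoopB rest (g ++ [x]) vl := by
          simp only [signSplitLoopB]; rw [hs]; simp [hx, hg]
        have := ih (g ++ [x]) vl true (by simp) (by simp [hx])
        simpa [h1, h2] using this
      | false =>
        -- sign change: old run emitted
        have h1 : (signSplitLoopA (x :: rest) [] g (-1) vl g) =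
            signSplitLoopA rest [x] [] 1 (vl ++ [g]) [x] := by
          simp [signSplitLoopA, hx]
        have h2 : signSplitLoopB (x :: rest) g vl = signSplitLoopB rest [x] (vl ++ [g]) := by
          simp only [signSplitLoopB]; rw [hs]; simp [hx, hg]
        have := ih [x] (vl ++ [g]) true (by simp) (by simp [hx])
        simpa [h1, h2] using this
    · cases s with
      | true =>
        have h1 : (signSplitLoopA (x :: rest) g [] 1 vl g) =
            signSplitLoopA rest [] [x] (-1) (vl ++ [g]) [x] := by
          simp [signSplitLoopA, hx]
        have h2 : signSplitLoopB (x :: rest) g vl = signSplitLoopB rest [x] (vl ++ [g]) := by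
          simp only [signSplitLoopB]; rw [hs]; simp [hx, hg]
        have := ih [x] (vl ++ [g]) false (by simp) (by simp [hx])
        simpa [h1, h2] using this
      | false =>
        have h1 : (signSplitLoopA (x :: rest) [] g (-1) vl g) =
            signSplitLoopA rest [] (g ++ [x]) (-1) vl (g ++ [x]) := by
          simp [signSplitLoopA, hx]
        have h2 : signSplitLoopB (x :: rest) g vl = signSplitLoopB rest (g ++ [x]) vl := by
          simp only [signSplitLoopB]; rw [hs]; simp [hx, hg]
        have := ih (g ++ [x]) vl false (by simp) (by simp [hx])
        simpa [h1, h2] using this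

-- ===== VERDICT (by name: the statement is the Claim_ definition above) =====
theorem sign_split_spec : Claim_equal_sign_split := by
  intro L VL _ hL
  unfold Spec_sign_split sign_split sign_split_alt
  cases L with
  | nil => exact absurd rfl hL
  | cons x rest =>
    by_cases hx : x ≥ 0
    · have hA : signSplitLoopA (x :: rest) [] [] 0 VL [] =
          signSplitLoopA rest [x] [] 1 VL [x] := by
        simp [signSplitLoopA, hx]
      have hB : signSplitLoopB (x :: rest) [] VL = signSplitLoopB rest [x] VL := by
        simp [signSplitLoopB]
      have := loopA_eq_loopB rest [x] VL true (by simp) (by simp [hx])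
      simpa [hA, hB] using this
    · have hA : signSplitLoopA (x :: rest) [] [] 0 VL [] =
          signSplitLoopA rest [] [x] (-1) VL [x] := by
        simp [signSplitLoopA, hx]
      have hB : signSplitLoopB (x :: rest) [] VL = signSplitLoopB rest [x] VL := by
        simp [signSplitLoopB]
      have := loopA_eq_loopB rest [x] VL false (by simp) (by simp [hx])
      simpa [hA, hB] using this
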